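-- pv_equiv track=rewrite | github.com/jbwod/beampipe-core | src/app/core/orchestration/slurm_client/state.py | normalize_state
-- ===== SOURCE A (Python) =====
-- SLURM_TERMINAL_OK_STATES: frozenset[str] = frozenset({"COMPLETED"})
--
-- SLURM_TERMINAL_FAILED_STATES: frozenset[str] = frozenset(
--     {
--         "BOOT_FAIL",
--         "DEADLINE",
--         "FAILED",
--         "LAUNCH_FAILED",
--         "NODE_FAIL",
--         "OUT_OF_MEMORY",
--         "PREEMPTED",
--         "RECONFIG_FAIL",
--     }
-- )
--
-- SLURM_TERMINAL_CANCELLED_STATES: frozenset[str] = frozenset({"CANCELLED", "REVOKED"})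
--
-- SLURM_TRANSIENT_STATES: frozenset[str] = frozenset({"PENDING", "RUNNING"})
--
-- _RUNNING_LIKE: frozenset[str] = frozenset(
--     {
--         "COMPLETING",
--         "CONFIGURING",
--         "EXPEDITING",
--         "POWER_UP_NODE",
--         "REQUEUED",
--         "REQUEUE_FED",
--         "RESIZING",
--         "SIGNALING",
--         "STAGE_OUT",
--         "UPDATE_DB",
--     }
-- )
--
-- _PENDING_LIKE: frozenset[str] = frozenset(
--     {
--         "RESV_DEL_HOLD",
--         "REQUEUE_HOLD",
--         "SPECIAL_EXIT",
--         "STOPPED",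
--         "SUSPENDED",
--     }
-- )
--
-- _NORM_RANK: dict[str, int] = {
--     "UNKNOWN": 0,
--     "PENDING": 1,
--     "RUNNING": 2,
--     "COMPLETED": 3,
--     "CANCELLED": 4,
--     "TIMEOUT": 5,
--     "FAILED": 6,
-- }
--
-- def _normalize_one_token(u: str) -> str:
--     if u.startswith("CANCELLED"):
--         return "CANCELLED"
--
--     if u in SLURM_TERMINAL_OK_STATES:
--         return "COMPLETED"
--     if u in SLURM_TRANSIENT_STATES:
--         return u
--     if u in SLURM_TERMINAL_FAILED_STATES:
--         return "FAILED"
--     if u == "TIMEOUT":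
--         return "TIMEOUT"
--     if u in SLURM_TERMINAL_CANCELLED_STATES:
--         return "CANCELLED"
--     if u in _RUNNING_LIKE:
--         return "RUNNING"
--     if u in _PENDING_LIKE:
--         return "PENDING"
--     return "UNKNOWN"
--
-- def normalize_state(state: str) -> str:
--     raw = (state or "").strip()
--     if not raw:
--         return "UNKNOWN"
--     u = raw.upper()
--
--     if "+" in u:
--         parts = [p.strip() for p in u.split("+") if p.strip()]
--         if len(parts) > 1:
--             norms = [_normalize_one_token(p) for p in parts]
--             return max(norms, key=lambda n: _NORM_RANK.get(n, 0))
--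
--     return _normalize_one_token(u)
-- ===== SOURCE B (Python) =====
-- # Severity-ordered scan: instead of normalizing each token and taking a max by
-- # rank, walk the canonical categories from most to least severe and return the
-- # first one that any token matches.
-- _FAILED = frozenset({"BOOT_FAIL", "DEADLINE", "FAILED", "LAUNCH_FAILED",
--                      "NODE_FAIL", "OUT_OF_MEMORY", "PREEMPTED", "RECONFIG_FAIL"})
-- _RUNNING_LIKE = frozenset({"COMPLETING", "CONFIGURING", "EXPEDITING",
--                            "POWER_UP_NODE", "REQUEUED", "REQUEUE_FED",
--                            "RESIZING", "SIGNALING", "STAGE_OUT", "UPDATE_DB"})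
-- _PENDING_LIKE = frozenset({"RESV_DEL_HOLD", "REQUEUE_HOLD", "SPECIAL_EXIT",
--                            "STOPPED", "SUSPENDED"})
--
-- _PRIORITY = [
--     ("FAILED", lambda t: t in _FAILED),
--     ("TIMEOUT", lambda t: t == "TIMEOUT"),
--     ("CANCELLED", lambda t: t.startswith("CANCELLED") or t == "REVOKED"),
--     ("COMPLETED", lambda t: t == "COMPLETED"),
--     ("RUNNING", lambda t: t == "RUNNING" or t in _RUNNING_LIKE),
--     ("PENDING", lambda t: t == "PENDING" or t in _PENDING_LIKE),
-- ]
--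
--
-- def normalize_state(state: str) -> str:
--     raw = (state or "").strip()
--     if not raw:
--         return "UNKNOWN"
--     u = raw.upper()
--     tokens = [u]
--     if "+" in u:
--         parts = [p for p in (q.strip() for q in u.split("+")) if p]
--         if len(parts) > 1:
--             tokens = parts
--     for label, test in _PRIORITY:
--         if any(test(t) for t in tokens):
--             return label
--     return "UNKNOWN"
-- ===== Notes on version B (the rewrite author's own statement) =====
-- stated objective: alternative
-- what changed: Replaces A's per-token normalize-to-label plus max-by-rank selection with a severity-ordered scan: the six canonical categories are tried from most to least severe and the first one any token matches is returned, so the rank dictionary and the max() over normalized labels disappear.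
import Mathlib
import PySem

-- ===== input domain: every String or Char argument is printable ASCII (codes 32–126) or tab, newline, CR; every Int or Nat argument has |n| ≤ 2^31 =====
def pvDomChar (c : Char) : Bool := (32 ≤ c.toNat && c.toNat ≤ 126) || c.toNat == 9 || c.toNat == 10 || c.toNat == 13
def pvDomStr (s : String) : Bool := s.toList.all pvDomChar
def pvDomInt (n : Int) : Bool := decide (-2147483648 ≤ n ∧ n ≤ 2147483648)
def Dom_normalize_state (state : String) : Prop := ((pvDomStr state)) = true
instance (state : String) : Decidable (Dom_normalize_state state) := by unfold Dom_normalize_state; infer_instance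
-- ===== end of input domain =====

-- B replaces A's per-token label + max-by-rank selection by a severity-ordered scan over the
-- categories, returning the first category any token matches (alternative decomposition, same results).

-- ===== PORT A =====
def SLURM_TERMINAL_OK_STATES : PySem.Set String := PySem.Set.ofList ["COMPLETED"]

def SLURM_TERMINAL_FAILED_STATES : PySem.Set String := PySem.Set.ofList
  ["BOOT_FAIL", "DEADLINE", "FAILED", "LAUNCH_FAILED", "NODE_FAIL",
   "OUT_OF_MEMORY", "PREEMPTED", "RECONFIG_FAIL"]

def SLURM_TERMINAL_CANCELLED_STATES : PySem.Set String := PySem.Set.ofList ["CANCELLED", "REVOKED"]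

def SLURM_TRANSIENT_STATES : PySem.Set String := PySem.Set.ofList ["PENDING", "RUNNING"]

def RUNNING_LIKE : PySem.Set String := PySem.Set.ofList
  ["COMPLETING", "CONFIGURING", "EXPEDITING", "POWER_UP_NODE", "REQUEUED",
   "REQUEUE_FED", "RESIZING", "SIGNALING", "STAGE_OUT", "UPDATE_DB"]

def PENDING_LIKE : PySem.Set String := PySem.Set.ofList
  ["RESV_DEL_HOLD", "REQUEUE_HOLD", "SPECIAL_EXIT", "STOPPED", "SUSPENDED"]

def NORM_RANK : PySem.Dict String Int := PySem.Dict.ofList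
  [("UNKNOWN", 0), ("PENDING", 1), ("RUNNING", 2), ("COMPLETED", 3),
   ("CANCELLED", 4), ("TIMEOUT", 5), ("FAILED", 6)]

def normalize_one_token (u : String) : String :=
  if PySem.Str.startswith u "CANCELLED" then "CANCELLED"
  else if u ∈ SLURM_TERMINAL_OK_STATES then "COMPLETED"
  else if u ∈ SLURM_TRANSIENT_STATES then u
  else if u ∈ SLURM_TERMINAL_FAILED_STATES then "FAILED"
  else if u = "TIMEOUT" then "TIMEOUT"
  else if u ∈ SLURM_TERMINAL_CANCELLED_STATES then "CANCELLED"
  else if u ∈ RUNNING_LIKE then "RUNNING"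
  else if u ∈ PENDING_LIKE then "PENDING"
  else "UNKNOWN"

def normalize_state (state : String) : String :=
  -- (state or "") = state for a str argument
  let raw := PySem.Str.strip state
  if raw == "" then "UNKNOWN"
  else
    let u := PySem.Str.upper raw
    if PySem.Str.isIn "+" u then
      -- split? is always `some …` here: the separator "+" is non-empty
      let parts := (((PySem.Str.split? u "+").getD []).map PySem.Str.strip).filter (fun p => !(p == ""))
      if parts.length > 1 then
        let norms := parts.map normalize_one_token
        -- max(norms, key=…): norms is non-empty here, so max? is `some …`
        (PySem.List.max? norms (fun n => PySem.Dict.getD NORM_RANK n 0)).getD "UNKNOWN"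
      else normalize_one_token u
    else normalize_one_token u

-- ===== PORT B =====
def B_FAILED : PySem.Set String := PySem.Set.ofList
  ["BOOT_FAIL", "DEADLINE", "FAILED", "LAUNCH_FAILED", "NODE_FAIL",
   "OUT_OF_MEMORY", "PREEMPTED", "RECONFIG_FAIL"]

def B_RUNNING_LIKE : PySem.Set String := PySem.Set.ofList
  ["COMPLETING", "CONFIGURING", "EXPEDITING", "POWER_UP_NODE", "REQUEUED",
   "REQUEUE_FED", "RESIZING", "SIGNALING", "STAGE_OUT", "UPDATE_DB"]

def B_PENDING_LIKE : PySem.Set String := PySem.Set.ofList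
  ["RESV_DEL_HOLD", "REQUEUE_HOLD", "SPECIAL_EXIT", "STOPPED", "SUSPENDED"]

def PRIORITY : List (String × (String → Bool)) :=
  [("FAILED", fun t => decide (t ∈ B_FAILED)),
   ("TIMEOUT", fun t => t == "TIMEOUT"),
   ("CANCELLED", fun t => PySem.Str.startswith t "CANCELLED" || t == "REVOKED"),
   ("COMPLETED", fun t => t == "COMPLETED"),
   ("RUNNING", fun t => t == "RUNNING" || decide (t ∈ B_RUNNING_LIKE)),
   ("PENDING", fun t => t == "PENDING" || decide (t ∈ B_PENDING_LIKE))]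

-- the `for label, test in _PRIORITY: if any(...): return label` loop
def pick (tokens : List String) : List (String × (String → Bool)) → String
  | [] => "UNKNOWN"
  | lt :: rest => if tokens.any lt.2 then lt.1 else pick tokens rest

def normalize_state_alt (state : String) : String :=
  let raw := PySem.Str.strip state
  if raw == "" then "UNKNOWN"
  else
    let u := PySem.Str.upper raw
    let tokens :=
      if PySem.Str.isIn "+" u then
        -- split? is always `some …` here: the separator "+" is non-empty
        let parts := (((PySem.Str.split? u "+").getD []).map PySem.Str.strip).filter (fun p => !(p == ""))
        if parts.length > 1 then parts else [u]
      else [u]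
    pick tokens PRIORITY

-- ===== PRECONDITION & SPEC =====
def Spec_normalize_state (state : String) (out : String) : Prop := out = normalize_state_alt state
instance (state : String) (out : String) : Decidable (Spec_normalize_state state out) := by unfold Spec_normalize_state; infer_instance

-- ===== CLAIM (what is proved, stated in full; the proofs are below) =====
def Claim_equal_normalize_state : Prop := ∀ (state : String), Dom_normalize_state state → Spec_normalize_state state (normalize_state state)

-- ===== LEMMAS AND PROOFS =====

-- proof-side: the seven canonical labels, the A-side rank, and the severity scan over labels
def L7 : List String :=
  ["UNKNOWN", "PENDING", "RUNNING", "COMPLETED", "CANCELLED", "TIMEOUT", "FAILED"]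

def rnk (a : String) : Int := PySem.Dict.getD NORM_RANK a 0

def hi (a b : String) : String := if rnk a < rnk b then b else a

def scan7 (ns : List String) : String :=
  if "FAILED" ∈ ns then "FAILED"
  else if "TIMEOUT" ∈ ns then "TIMEOUT"
  else if "CANCELLED" ∈ ns then "CANCELLED"
  else if "COMPLETED" ∈ ns then "COMPLETED"
  else if "RUNNING" ∈ ns then "RUNNING"
  else if "PENDING" ∈ ns then "PENDING"
  else "UNKNOWN"

theorem norm_one_mem_L7 (u : String) : normalize_one_token u ∈ L7 := by
  unfold normalize_one_token
  split_ifs with h1 h2 h3 <;> try decide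
  · simp only [SLURM_TRANSIENT_STATES, PySem.Set.mem_ofList, List.mem_cons, List.not_mem_nil,
      or_false] at h3
    rcases h3 with rfl | rfl <;> decide

-- each severity test recognises exactly the tokens A normalizes to its label
theorem tests_characterize (t : String) :
    (decide (t ∈ B_FAILED) = (normalize_one_token t == "FAILED")) ∧
    ((t == "TIMEOUT") = (normalize_one_token t == "TIMEOUT")) ∧
    ((PySem.Str.startswith t "CANCELLED" || t == "REVOKED") = (normalize_one_token t == "CANCELLED")) ∧
    ((t == "COMPLETED") = (normalize_one_token t == "COMPLETED")) ∧
    ((t == "RUNNING" || decide (t ∈ B_RUNNING_LIKE)) = (normalize_one_token t == "RUNNING")) ∧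
    ((t == "PENDING" || decide (t ∈ B_PENDING_LIKE)) = (normalize_one_token t == "PENDING")) := by
  by_cases hk : t ∈ ["COMPLETED", "BOOT_FAIL", "DEADLINE", "FAILED", "LAUNCH_FAILED", "NODE_FAIL", "OUT_OF_MEMORY", "PREEMPTED", "RECONFIG_FAIL", "CANCELLED", "REVOKED", "TIMEOUT", "PENDING", "RUNNING", "COMPLETING", "CONFIGURING", "EXPEDITING", "POWER_UP_NODE", "REQUEUED", "REQUEUE_FED", "RESIZING", "SIGNALING", "STAGE_OUT", "UPDATE_DB", "RESV_DEL_HOLD", "REQUEUE_HOLD", "SPECIAL_EXIT", "STOPPED", "SUSPENDED"]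
  · simp only [List.mem_cons, List.not_mem_nil, or_false] at hk
    rcases hk with rfl | rfl | rfl | rfl | rfl | rfl | rfl | rfl | rfl | rfl | rfl | rfl | rfl | rfl | rfl | rfl | rfl | rfl | rfl | rfl | rfl | rfl | rfl | rfl | rfl | rfl | rfl | rfl | rfl <;> decide
  · simp only [List.mem_cons, List.not_mem_nil, or_false, not_or] at hk
    obtain ⟨h1, h2, h3, h4, h5, h6, h7, h8, h9, h10, h11, h12, h13, h14, h15, h16, h17, h18, h19, h20, h21, h22, h23, h24, h25, h26, h27, h28, h29⟩ := hk
    have hone : normalize_one_token t =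
        (if PySem.Str.startswith t "CANCELLED" then "CANCELLED" else "UNKNOWN") := by
      unfold normalize_one_token
      simp [SLURM_TERMINAL_OK_STATES, SLURM_TRANSIENT_STATES, SLURM_TERMINAL_FAILED_STATES,
        SLURM_TERMINAL_CANCELLED_STATES, RUNNING_LIKE, PENDING_LIKE, PySem.Set.mem_ofList,
        h1, h2, h3, h4, h5, h6, h7, h8, h9, h10, h11, h12, h13, h14, h15, h16, h17, h18,
        h19, h20, h21, h22, h23, h24, h25, h26, h27, h28, h29]
    by_cases hs : PySem.Str.startswith t "CANCELLED"
    · rw [hone, if_pos hs]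
      simp only [hs, Bool.true_or]
      simp [B_FAILED, B_RUNNING_LIKE, B_PENDING_LIKE, PySem.Set.mem_ofList,
        h1, h2, h3, h4, h5, h6, h7, h8, h9, h10, h11, h12, h13, h14, h15, h16, h17, h18,
        h19, h20, h21, h22, h23, h24, h25, h26, h27, h28, h29]
    · rw [hone, if_neg hs]
      simp only [Bool.not_eq_true] at hs
      simp only [hs, Bool.false_or]
      simp [B_FAILED, B_RUNNING_LIKE, B_PENDING_LIKE, PySem.Set.mem_ofList,
        h1, h2, h3, h4, h5, h6, h7, h8, h9, h10, h11, h12, h13, h14, h15, h16, h17, h18,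
        h19, h20, h21, h22, h23, h24, h25, h26, h27, h28, h29]

-- B's priority loop is the severity scan of the normalized labels
theorem any_label (tokens : List String) (lbl : String) (test : String → Bool)
    (h : ∀ t, test t = (normalize_one_token t == lbl)) :
    tokens.any test = decide (lbl ∈ tokens.map normalize_one_token) := by
  rw [Bool.eq_iff_iff]
  simp only [List.any_eq_true, h, beq_iff_eq, decide_eq_true_eq, List.mem_map]

theorem pick_eq_scan7 (tokens : List String) :
    pick tokens PRIORITY = scan7 (tokens.map normalize_one_token) := by
  simp only [PRIORITY, pick]
  rw [any_label tokens "FAILED" _ (fun t => (tests_characterize t).1),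
      any_label tokens "TIMEOUT" _ (fun t => (tests_characterize t).2.1),
      any_label tokens "CANCELLED" _ (fun t => (tests_characterize t).2.2.1),
      any_label tokens "COMPLETED" _ (fun t => (tests_characterize t).2.2.2.1),
      any_label tokens "RUNNING" _ (fun t => (tests_characterize t).2.2.2.2.1),
      any_label tokens "PENDING" _ (fun t => (tests_characterize t).2.2.2.2.2)]
  simp only [scan7, decide_eq_true_eq]

-- the rank of each canonical label, as rewrite rules
theorem rnk_unknown : rnk "UNKNOWN" = 0 := by decide
theorem rnk_pending : rnk "PENDING" = 1 := by decide
theorem rnk_running : rnk "RUNNING" = 2 := by decide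
theorem rnk_completed : rnk "COMPLETED" = 3 := by decide
theorem rnk_cancelled : rnk "CANCELLED" = 4 := by decide
theorem rnk_timeout : rnk "TIMEOUT" = 5 := by decide
theorem rnk_failed : rnk "FAILED" = 6 := by decide

-- merging two labels by rank and scanning equals scanning both
set_option maxHeartbeats 2000000 in
theorem hi_scan (a b : String) (ha : a ∈ L7) (hb : b ∈ L7) (xs : List String) :
    scan7 (hi a b :: xs) = scan7 (a :: b :: xs) := by
  fin_cases ha <;> fin_cases hb <;>
    simp [hi, rnk_unknown, rnk_pending, rnk_running, rnk_completed, rnk_cancelled,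
      rnk_timeout, rnk_failed, scan7, List.mem_cons]

theorem foldl_hi_eq_scan7 (ns : List String) (m : String) (hm : m ∈ L7)
    (hns : ∀ x ∈ ns, x ∈ L7) :
    List.foldl hi m ns = scan7 (m :: ns) := by
  induction ns generalizing m with
  | nil =>
    simp only [List.foldl_nil]
    fin_cases hm <;> decide
  | cons n ns ih =>
    have hn : n ∈ L7 := hns n (by simp)
    have hhi : hi m n ∈ L7 := by
      unfold hi; split <;> assumption
    rw [List.foldl_cons, ih (hi m n) hhi (fun x hx => hns x (by simp [hx])), hi_scan m n hm hn]

-- A's max(norms, key=rank) over the option state, as a plain fold of hi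
theorem max_fold_hi (ns : List String) (m : String) :
    List.foldl
        (fun acc x => match acc with
          | none => some x
          | some a => if rnk a < rnk x then some x else some a)
        (some m) ns
      = some (List.foldl hi m ns) := by
  induction ns generalizing m with
  | nil => rfl
  | cons n ns ih =>
    simp only [List.foldl_cons]
    show List.foldl _ (if rnk m < rnk n then some n else some m) ns = _
    unfold hi
    split <;> exact ih _

theorem a_max (p : String) (ps : List String) :
    PySem.List.max? ((p :: ps).map normalize_one_token)
        (fun n => PySem.Dict.getD NORM_RANK n 0)
      = some (scan7 ((p :: ps).map normalize_one_token)) := by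
  simp only [PySem.List.max?, List.map_cons, List.foldl_cons]
  refine Eq.trans (PySem.List.foldl_congr_mem _ _ _ _ ?_)
    ((max_fold_hi (ps.map normalize_one_token) (normalize_one_token p)).trans
      (congrArg some
        (foldl_hi_eq_scan7 (ps.map normalize_one_token) (normalize_one_token p)
          (norm_one_mem_L7 p)
          (by intro x hx; obtain ⟨y, _, rfl⟩ := List.mem_map.mp hx; exact norm_one_mem_L7 y))))
  intro acc x _
  cases acc <;> rfl

theorem scan7_single (u : String) : scan7 [normalize_one_token u] = normalize_one_token u := by
  have h := norm_one_mem_L7 u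
  simp only [L7, List.mem_cons, List.not_mem_nil, or_false] at h
  rcases h with h | h | h | h | h | h | h <;> rw [h] <;> decide

-- ===== VERDICT (by name: the statement is the Claim_ definition above) =====
set_option maxHeartbeats 1000000 in
theorem normalize_state_spec : Claim_equal_normalize_state := by
  intro state _
  unfold Spec_normalize_state normalize_state normalize_state_alt
  by_cases h1 : PySem.Str.strip state == ""
  · simp only [h1, if_true]
  · simp only [Bool.not_eq_true] at h1
    simp only [h1, Bool.false_eq_true, if_false]
    by_cases h2 : PySem.Str.isIn "+" (PySem.Str.upper (PySem.Str.strip state))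
    · simp only [h2, if_true]
      rcases hp : List.filter (fun p => !(p == ""))
          (List.map PySem.Str.strip
            ((PySem.Str.split? (PySem.Str.upper (PySem.Str.strip state)) "+").getD []))
        with _ | ⟨p, ps⟩
      · simp only [List.length_nil, gt_iff_lt]
        rw [if_neg (by omega), if_neg (by omega), pick_eq_scan7]
        simp only [List.map_cons, List.map_nil]
        exact (scan7_single _).symm
      · by_cases h3 : 1 < (p :: ps).length
        · rw [if_pos h3, if_pos h3, a_max, pick_eq_scan7]
          simp only [Option.getD_some]
        · rw [if_neg h3, if_neg h3, pick_eq_scan7]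
          simp only [List.map_cons, List.map_nil]
          exact (scan7_single _).symm
    · simp only [Bool.not_eq_true] at h2
      simp only [h2, Bool.false_eq_true, if_false, pick_eq_scan7]
      simp only [List.map_cons, List.map_nil]
      exact (scan7_single _).symm
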